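-- pv_equiv track=rewrite | github.com/Jaredwinn77/Supply-Chain | experiments/code/Graphclass.py | remove_hangers
-- ===== SOURCE A (Python) =====
-- from collections import Counter
--
-- def remove_hangers(subnetworks):
--     """Remove all edges of nodes of degree 1."""
--     cleaned = []
--
--     for subnetwork in subnetworks:
--         # Track node degrees across the entire subnetwork
--         node_degree = Counter()
--         # First pass: count the degree of each node in the subnetwork
--         for node1, node2, color in subnetwork:
--             node_degree[node1] += 1
--             node_degree[node2] += 1
--
--         # Remove edges with nodes that have degree 1
--         done = False
--         while not done:
--             # Identify nodes with degree 1 (hanging nodes)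
--             hanging_nodes = {node for node, degree in node_degree.items() if degree == 1}
--
--             if not hanging_nodes:
--                 # No hanging nodes, we can stop
--                 done = True
--             else:
--                 # Filter out the edges involving hanging nodes
--                 filtered_edges = [(node1, node2, color) for (node1, node2, color) in subnetwork if
--                                   node1 not in hanging_nodes and node2 not in hanging_nodes]
--
--                 # Update the node degrees after filtering
--                 node_degree = Counter()
--                 for node1, node2, color in filtered_edges:
--                     node_degree[node1] += 1
--                     node_degree[node2] += 1
--
--                 # Set the filtered edges as the new subnetwork
--                 subnetwork = filtered_edges
--
--         # After cleaning, add the subnetwork to the result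
--         cleaned.append(subnetwork)
--     return cleaned
-- ===== SOURCE B (Python) =====
-- from collections import Counter, deque
--
--
-- def remove_hangers(subnetworks):
--     """Remove all edges of nodes of degree 1 (2-core, by peeling one node at a time)."""
--     cleaned = []
--     for subnetwork in subnetworks:
--         removed = set()
--         # Seed the worklist with every node of degree 1.
--         degree = Counter()
--         for node1, node2, _color in subnetwork:
--             degree[node1] += 1
--             degree[node2] += 1
--         queue = deque(node for node, d in degree.items() if d == 1)
--         while queue:
--             u = queue.popleft()
--             if u in removed or _live_degree(subnetwork, removed, u) != 1:
--                 continue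
--             # u hangs: the other endpoint of its single live edge becomes a candidate.
--             neighbours = [node2 if node1 == u else node1
--                           for node1, node2, _c in subnetwork
--                           if node1 not in removed and node2 not in removed
--                           and (node1 == u or node2 == u)]
--             removed.add(u)
--             queue.extend(neighbours)
--         cleaned.append([(n1, n2, c) for (n1, n2, c) in subnetwork
--                         if n1 not in removed and n2 not in removed])
--     return cleaned
--
--
-- def _live_degree(subnetwork, removed, x):
--     d = 0
--     for node1, node2, _color in subnetwork:
--         if node1 not in removed and node2 not in removed:
--             if node1 == x:
--                 d += 1
--             if node2 == x:
--                 d += 1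
--     return d
-- ===== Notes on version B (the rewrite author's own statement) =====
-- stated objective: alternative
-- what changed: A repeatedly rebuilds the whole edge list and recounts all degrees each round until no degree-1 node remains; B computes the same 2-core by peeling single degree-1 nodes off a worklist (tracking a removed-node set) and filters the original edge list once at the end.
import Mathlib
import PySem

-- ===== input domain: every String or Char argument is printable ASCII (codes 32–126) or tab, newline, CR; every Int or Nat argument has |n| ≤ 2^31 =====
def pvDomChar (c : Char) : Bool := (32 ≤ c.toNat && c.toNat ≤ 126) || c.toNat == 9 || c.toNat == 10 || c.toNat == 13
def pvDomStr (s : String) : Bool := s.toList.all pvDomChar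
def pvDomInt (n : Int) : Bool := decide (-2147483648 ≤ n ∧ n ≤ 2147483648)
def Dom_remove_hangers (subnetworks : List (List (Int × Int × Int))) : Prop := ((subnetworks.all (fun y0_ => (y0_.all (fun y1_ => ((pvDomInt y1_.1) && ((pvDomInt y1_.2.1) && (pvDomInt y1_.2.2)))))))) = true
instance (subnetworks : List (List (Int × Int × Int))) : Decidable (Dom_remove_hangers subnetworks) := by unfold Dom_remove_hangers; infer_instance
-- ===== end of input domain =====

-- B replaces A's fixpoint of whole-list rounds (rebuild the edge list and recount all degrees until no
-- degree-1 node is left) by peeling single degree-1 nodes off a worklist while tracking a removed-node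
-- set, filtering the original edge list once at the end (objective: alternative algorithm, same results).

-- ===== PORT A =====
-- node_degree: Counter built with the two '+= 1' updates per edge
def pvCountDeg (sub : List (Int × Int × Int)) : PySem.Dict Int Int :=
  sub.foldl (fun d e => (d.modify e.1 0 (· + 1)).modify e.2.1 0 (· + 1)) PySem.Dict.empty

-- {node for node, degree in node_degree.items() if degree == 1}
def pvHanging (nd : PySem.Dict Int Int) : PySem.Set Int :=
  PySem.Set.ofList ((nd.items.filter (fun p => p.2 == 1)).map (fun p => p.1))

-- [(n1, n2, c) for (n1, n2, c) in subnetwork if n1 not in hanging and n2 not in hanging]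
def pvFilterHang (sub : List (Int × Int × Int)) (h : PySem.Set Int) : List (Int × Int × Int) :=
  sub.filter (fun e => !(PySem.Set.contains h e.1) && !(PySem.Set.contains h e.2.1))

-- endpoints of the edges, in order (proof helper used by the termination lemma the port cites)
def pvEndpoints (sub : List (Int × Int × Int)) : List Int :=
  sub.flatMap (fun e => [e.1, e.2.1])

-- termination lemma cited by pvALoop's decreasing_by
theorem pvFoldTwoModify (sub : List (Int × Int × Int)) (d : PySem.Dict Int Int) :
    sub.foldl (fun d e => (d.modify e.1 0 (· + 1)).modify e.2.1 0 (· + 1)) d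
      = (pvEndpoints sub).foldl (fun d x => d.modify x 0 (· + 1)) d := by
  induction sub generalizing d with
  | nil => simp [pvEndpoints]
  | cons e t ih => simp only [pvEndpoints, List.flatMap_cons, List.foldl_append,
      List.foldl] at *; rw [ih]

theorem pvCountDeg_eq_counter (sub : List (Int × Int × Int)) :
    pvCountDeg sub = PySem.Dict.counter (pvEndpoints sub) := by
  rw [PySem.Dict.counter_eq_foldl]
  exact pvFoldTwoModify sub PySem.Dict.empty

theorem mem_counterOnes (l : List Int) (v : Int) :
    v ∈ ((PySem.Dict.counter l).items.filter (fun p => p.2 == 1)).map (fun p => p.1)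
      ↔ l.count v = 1 := by
  rw [PySem.Dict.items_counter]
  simp only [List.mem_map, List.mem_filter]
  constructor
  · rintro ⟨p, ⟨⟨k, hk, rfl⟩, h1⟩, rfl⟩
    simpa using h1
  · intro h
    refine ⟨(v, (l.count v : Int)), ⟨⟨v, ?_, rfl⟩, by simp [h]⟩, rfl⟩
    rw [PySem.Set.mem_ofList]
    exact List.count_pos_iff.mp (by omega)

theorem mem_pvHanging (sub : List (Int × Int × Int)) (v : Int) :
    v ∈ pvHanging (pvCountDeg sub) ↔ (pvEndpoints sub).count v = 1 := by
  rw [pvHanging, PySem.Set.mem_ofList, pvCountDeg_eq_counter, mem_counterOnes]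

theorem pvFilterHang_length_lt (sub : List (Int × Int × Int))
    (h : ¬ (pvHanging (pvCountDeg sub)).isEmpty = true) :
    (pvFilterHang sub (pvHanging (pvCountDeg sub))).length < sub.length := by
  rw [pvFilterHang, List.length_filter_lt_length_iff_exists]
  rw [Bool.not_eq_true, List.isEmpty_eq_false_iff_exists_mem] at h
  obtain ⟨v, hv⟩ := h
  have hc := (mem_pvHanging sub v).mp hv
  have hvmem : v ∈ pvEndpoints sub := List.count_pos_iff.mp (by omega)
  rw [pvEndpoints, List.mem_flatMap] at hvmem
  obtain ⟨e, he, hve⟩ := hvmem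
  refine ⟨e, he, ?_⟩
  simp only [List.mem_cons, List.not_mem_nil, or_false] at hve
  rcases hve with rfl | rfl
  · simp
    exact fun h' => absurd hv h'
  · simp
    exact fun _ => hv

-- the 'while not done' loop: recompute the Counter of the current edge list, test for hanging
-- nodes, filter them out and loop
def pvALoop (sub : List (Int × Int × Int)) : List (Int × Int × Int) :=
  let hanging := pvHanging (pvCountDeg sub)
  if hanging.isEmpty then sub
  else pvALoop (pvFilterHang sub hanging)
termination_by sub.length
decreasing_by
  exact pvFilterHang_length_lt sub ‹_›

def remove_hangers (subnetworks : List (List (Int × Int × Int))) : List (List (Int × Int × Int)) :=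
  subnetworks.map pvALoop

-- ===== PORT B =====
-- the seeding Counter of Source B (same '+= 1' loop as A's Python, run once)
def pvCountDegB (sub : List (Int × Int × Int)) : PySem.Dict Int Int :=
  sub.foldl (fun d e => (d.modify e.1 0 (· + 1)).modify e.2.1 0 (· + 1)) PySem.Dict.empty

-- deque(node for node, d in degree.items() if d == 1)
def pvInitQueue (sub : List (Int × Int × Int)) : List Int :=
  ((pvCountDegB sub).items.filter (fun p => p.2 == 1)).map (fun p => p.1)

-- _live_degree(subnetwork, removed, x)
def pvLiveDeg (sub : List (Int × Int × Int)) (removed : PySem.Set Int) (x : Int) : Int :=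
  sub.foldl (fun d e =>
    if !(PySem.Set.contains removed e.1) && !(PySem.Set.contains removed e.2.1) then
      let d1 := if e.1 == x then d + 1 else d
      if e.2.1 == x then d1 + 1 else d1
    else d) 0

-- the neighbours comprehension
def pvNbrs (sub : List (Int × Int × Int)) (removed : PySem.Set Int) (u : Int) : List Int :=
  (sub.filter (fun e =>
      (!(PySem.Set.contains removed e.1) && !(PySem.Set.contains removed e.2.1))
        && (e.1 == u || e.2.1 == u))).map
    (fun e => if e.1 == u then e.2.1 else e.1)

-- the surviving (live) edges, given the removed-node set
def pvLive (sub : List (Int × Int × Int)) (removed : PySem.Set Int) : List (Int × Int × Int) :=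
  sub.filter (fun e => !(PySem.Set.contains removed e.1) && !(PySem.Set.contains removed e.2.1))

-- degree of a node in an edge list, self-loops counting twice (proof helper; also used by the
-- termination lemma pvBLoop cites)
def pvEdeg (L : List (Int × Int × Int)) (x : Int) : Nat :=
  L.countP (fun e => e.1 == x) + L.countP (fun e => e.2.1 == x)

theorem pvEdeg_cons (e : Int × Int × Int) (t : List (Int × Int × Int)) (x : Int) :
    pvEdeg (e :: t) x
      = pvEdeg t x + (if e.1 == x then 1 else 0) + (if e.2.1 == x then 1 else 0) := by
  simp only [pvEdeg, List.countP_cons]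
  split_ifs <;> omega

theorem pvContains_add (s : PySem.Set Int) (u x : Int) :
    PySem.Set.contains (PySem.Set.add s u) x = (PySem.Set.contains s x || x == u) := by
  by_cases hx : x ∈ s <;> by_cases hxu : x = u <;>
    simp_all [PySem.Set.mem_add]

theorem pvLive_add (sub : List (Int × Int × Int)) (removed : PySem.Set Int) (u : Int) :
    pvLive sub (PySem.Set.add removed u)
      = (pvLive sub removed).filter (fun e => !(e.1 == u) && !(e.2.1 == u)) := by
  rw [pvLive, pvLive, List.filter_filter]
  apply List.filter_congr
  intro e _
  rw [pvContains_add, pvContains_add]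
  cases PySem.Set.contains removed e.1 <;> cases PySem.Set.contains removed e.2.1 <;>
    cases e.1 == u <;> cases e.2.1 == u <;> rfl

theorem pvLiveDeg_go (sub : List (Int × Int × Int)) (removed : PySem.Set Int) (x : Int) :
    ∀ a : Int,
      sub.foldl (fun d e =>
        if !(PySem.Set.contains removed e.1) && !(PySem.Set.contains removed e.2.1) then
          let d1 := if e.1 == x then d + 1 else d
          if e.2.1 == x then d1 + 1 else d1
        else d) a = a + (pvEdeg (pvLive sub removed) x : Int) := by
  induction sub with
  | nil => simp [pvLive, pvEdeg]
  | cons e t ih =>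
    intro a
    simp only [List.foldl_cons]
    by_cases hp : (!(PySem.Set.contains removed e.1)
        && !(PySem.Set.contains removed e.2.1)) = true
    · rw [if_pos hp, pvLive, List.filter_cons, if_pos hp, ← pvLive, pvEdeg_cons]
      simp only [ih]
      split_ifs <;> push_cast <;> ring
    · rw [if_neg hp, pvLive, List.filter_cons, if_neg hp, ← pvLive]
      exact ih a

theorem pvLiveDeg_eq (sub : List (Int × Int × Int)) (removed : PySem.Set Int) (x : Int) :
    pvLiveDeg sub removed x = (pvEdeg (pvLive sub removed) x : Int) := by
  rw [pvLiveDeg, pvLiveDeg_go]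
  ring

theorem pvCountP_or_le (L : List (Int × Int × Int)) (p q : (Int × Int × Int) → Bool) :
    L.countP (fun e => p e || q e) ≤ L.countP p + L.countP q := by
  induction L with
  | nil => simp
  | cons e t ih =>
    simp only [List.countP_cons]
    cases p e <;> cases q e <;> simp <;> omega

theorem pvIncident_one {L : List (Int × Int × Int)} {u : Int} (h : pvEdeg L u = 1) :
    L.countP (fun e => e.1 == u || e.2.1 == u) = 1 := by
  have hle : L.countP (fun e => e.1 == u || e.2.1 == u)
      ≤ L.countP (fun e => e.1 == u) + L.countP (fun e => e.2.1 == u) :=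
    pvCountP_or_le L _ _
  have h1 : L.countP (fun e => e.1 == u) ≤ L.countP (fun e => e.1 == u || e.2.1 == u) :=
    List.countP_mono_left (fun e _ hh => by simp [hh])
  have h2 : L.countP (fun e => e.2.1 == u) ≤ L.countP (fun e => e.1 == u || e.2.1 == u) :=
    List.countP_mono_left (fun e _ hh => by simp [hh])
  rw [pvEdeg] at h
  omega

theorem pvNbrs_eq (sub : List (Int × Int × Int)) (removed : PySem.Set Int) (u : Int) :
    pvNbrs sub removed u
      = ((pvLive sub removed).filter (fun e => e.1 == u || e.2.1 == u)).map
          (fun e => if e.1 == u then e.2.1 else e.1) := by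
  rw [pvNbrs, pvLive, List.filter_filter]
  congr 1
  apply List.filter_congr
  intro e _
  cases PySem.Set.contains removed e.1 <;> cases PySem.Set.contains removed e.2.1 <;>
    cases e.1 == u <;> cases e.2.1 == u <;> rfl

-- termination lemma cited by pvBLoop's decreasing_by
theorem pvBLoop_term (sub : List (Int × Int × Int)) (removed : PySem.Set Int) (u : Int)
    (h2 : pvLiveDeg sub removed u = 1) :
    (pvNbrs sub removed u).length + 2 * (pvLive sub (PySem.Set.add removed u)).length + 1
      ≤ 2 * (pvLive sub removed).length := by
  have hdeg : pvEdeg (pvLive sub removed) u = 1 := by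
    have := pvLiveDeg_eq sub removed u
    rw [h2] at this
    exact_mod_cast this.symm
  have hinc := pvIncident_one hdeg
  have hlen : (pvNbrs sub removed u).length
      = (pvLive sub removed).countP (fun e => e.1 == u || e.2.1 == u) := by
    rw [pvNbrs_eq, List.length_map]
    exact List.countP_eq_length_filter.symm
  have hsplit : (pvLive sub removed).countP (fun e => !(e.1 == u) && !(e.2.1 == u))
        + (pvLive sub removed).countP (fun e => e.1 == u || e.2.1 == u)
      = (pvLive sub removed).length := by
    have h0 := List.length_eq_countP_add_countP (l := pvLive sub removed)
      (p := fun e => e.1 == u || e.2.1 == u)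
    have hcongr : (pvLive sub removed).countP (fun e => !decide ((e.1 == u || e.2.1 == u) = true))
        = (pvLive sub removed).countP (fun e => !(e.1 == u) && !(e.2.1 == u)) := by
      apply List.countP_congr
      intro e _
      by_cases h1 : e.1 = u <;> by_cases h2 : e.2.1 = u <;> simp [h1, h2]
    simp only [decide_not] at h0
    omega
  have hadd : (pvLive sub (PySem.Set.add removed u)).length
      = (pvLive sub removed).countP (fun e => !(e.1 == u) && !(e.2.1 == u)) := by
    rw [pvLive_add]
    exact List.countP_eq_length_filter.symm
  omega

-- the worklist loop: pop a candidate, re-check its live degree, peel it and enqueue its neighbour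
def pvBLoop (sub : List (Int × Int × Int)) (removed : PySem.Set Int) (queue : List Int) :
    PySem.Set Int :=
  match queue with
  | [] => removed
  | u :: rest =>
    if PySem.Set.contains removed u || !(pvLiveDeg sub removed u == 1) then
      pvBLoop sub removed rest
    else
      pvBLoop sub (PySem.Set.add removed u) (rest ++ pvNbrs sub removed u)
termination_by queue.length + 2 * (pvLive sub removed).length
decreasing_by
  all_goals rename_i h
  all_goals simp only [Bool.or_eq_true, Bool.not_eq_true', not_or,
    Bool.not_eq_true, Bool.not_eq_false, beq_iff_eq] at h
  · simp only [List.length_cons]; omega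
  · have := pvBLoop_term sub removed u h.2
    simp only [List.length_cons, List.length_append]
    omega

def remove_hangers_alt (subnetworks : List (List (Int × Int × Int))) :
    List (List (Int × Int × Int)) :=
  subnetworks.map (fun sub =>
    let removed := pvBLoop sub PySem.Set.empty (pvInitQueue sub)
    pvLive sub removed)

-- ===== PRECONDITION & SPEC =====
def Spec_remove_hangers (subnetworks : List (List (Int × Int × Int))) (out : List (List (Int × Int × Int))) : Prop := out = remove_hangers_alt subnetworks
instance (subnetworks : List (List (Int × Int × Int))) (out : List (List (Int × Int × Int))) : Decidable (Spec_remove_hangers subnetworks out) := by unfold Spec_remove_hangers; infer_instance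

-- ===== CLAIM (what is proved, stated in full; the proofs are below) =====
def Claim_equal_remove_hangers : Prop := ∀ (subnetworks : List (List (Int × Int × Int))), Dom_remove_hangers subnetworks → Spec_remove_hangers subnetworks (remove_hangers subnetworks)

-- ===== LEMMAS AND PROOFS =====

-- an edge list is stable: it has no node of degree 1
def pvGood (L : List (Int × Int × Int)) : Prop := ∀ v, pvEdeg L v ≠ 1

theorem pvEndpoints_count (sub : List (Int × Int × Int)) (v : Int) :
    (pvEndpoints sub).count v = pvEdeg sub v := by
  induction sub with
  | nil => simp [pvEndpoints, pvEdeg]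
  | cons e t ih =>
    rw [pvEndpoints, List.flatMap_cons, ← pvEndpoints, pvEdeg_cons]
    simp only [List.count_append, ih]
    simp only [List.count_cons, List.count_nil]
    by_cases h1 : e.1 = v <;> by_cases h2 : e.2.1 = v <;> simp [h1, h2] <;> omega

theorem pvEdeg_sublist {G L : List (Int × Int × Int)} (h : G.Sublist L) (v : Int) :
    pvEdeg G v ≤ pvEdeg L v :=
  Nat.add_le_add (List.Sublist.countP_le h) (List.Sublist.countP_le h)

theorem pvEdeg_pos {L : List (Int × Int × Int)} {e : Int × Int × Int} {v : Int}
    (he : e ∈ L) (hv : e.1 = v ∨ e.2.1 = v) : 1 ≤ pvEdeg L v := by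
  rw [pvEdeg]
  rcases hv with hv | hv
  · have : 0 < L.countP (fun e => e.1 == v) :=
      List.countP_pos_iff.mpr ⟨e, he, by simp [hv]⟩
    omega
  · have : 0 < L.countP (fun e => e.2.1 == v) :=
      List.countP_pos_iff.mpr ⟨e, he, by simp [hv]⟩
    omega

-- a good sublist survives one round of A's filtering
theorem pvGood_sublist_filterHang {sub G : List (Int × Int × Int)}
    (hG : G.Sublist sub) (hg : pvGood G) :
    G.Sublist (pvFilterHang sub (pvHanging (pvCountDeg sub))) := by
  have hpred : ∀ e ∈ G,
      (!(PySem.Set.contains (pvHanging (pvCountDeg sub)) e.1)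
        && !(PySem.Set.contains (pvHanging (pvCountDeg sub)) e.2.1)) = true := by
    intro e he
    have hnot : ∀ v : Int, (e.1 = v ∨ e.2.1 = v) → v ∉ pvHanging (pvCountDeg sub) := by
      intro v hv hmem
      have h1 := (mem_pvHanging sub v).mp hmem
      rw [pvEndpoints_count] at h1
      have h2 : 1 ≤ pvEdeg G v := pvEdeg_pos he hv
      have h3 : pvEdeg G v ≤ pvEdeg sub v := pvEdeg_sublist hG v
      exact hg v (by omega)
    have e1 := hnot e.1 (Or.inl rfl)
    have e2 := hnot e.2.1 (Or.inr rfl)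
    simp [e1, e2]
  have := hG.filter
    (fun e => !(PySem.Set.contains (pvHanging (pvCountDeg sub)) e.1)
      && !(PySem.Set.contains (pvHanging (pvCountDeg sub)) e.2.1))
  rwa [List.filter_eq_self.mpr hpred] at this

theorem pvGood_of_hanging_empty {sub : List (Int × Int × Int)}
    (h : (pvHanging (pvCountDeg sub)).isEmpty = true) : pvGood sub := by
  intro v hv
  have : v ∈ pvHanging (pvCountDeg sub) := by
    rw [mem_pvHanging, pvEndpoints_count]
    exact hv
  rw [List.isEmpty_iff] at h
  rw [h] at this
  exact List.not_mem_nil this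

-- A's loop returns a good sublist and keeps every good sublist
theorem pvALoop_master (sub : List (Int × Int × Int)) :
    (pvALoop sub).Sublist sub ∧ pvGood (pvALoop sub) ∧
      ∀ G, G.Sublist sub → pvGood G → G.Sublist (pvALoop sub) := by
  induction sub using pvALoop.induct with
  | case1 sub hang h =>
    have h' : (pvHanging (pvCountDeg sub)).isEmpty = true := h
    rw [pvALoop]
    simp only [h', if_pos]
    exact ⟨List.Sublist.refl sub, pvGood_of_hanging_empty h', fun G hG _ => hG⟩
  | case2 sub hang h ih =>
    have h' : ¬ (pvHanging (pvCountDeg sub)).isEmpty = true := h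
    rw [pvALoop]
    simp only [h', if_neg, Bool.false_eq_true, not_false_iff]
    obtain ⟨ihs, ihg, ihm⟩ := ih
    refine ⟨ihs.trans List.filter_sublist, ihg, fun G hG hg => ?_⟩
    exact ihm G (pvGood_sublist_filterHang hG hg) hg

theorem pvEdeg_live_removed {sub : List (Int × Int × Int)} {removed : PySem.Set Int} {v : Int}
    (h : PySem.Set.contains removed v = true) : pvEdeg (pvLive sub removed) v = 0 := by
  rw [pvEdeg]
  have h1 : (pvLive sub removed).countP (fun e => e.1 == v) = 0 := by
    rw [List.countP_eq_zero]
    intro e he hc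
    rw [pvLive, List.mem_filter] at he
    obtain ⟨-, hb⟩ := he
    rw [Bool.and_eq_true, Bool.not_eq_true', Bool.not_eq_true'] at hb
    rw [beq_iff_eq] at hc
    rw [hc, h] at hb
    exact absurd hb.1 (by decide)
  have h2 : (pvLive sub removed).countP (fun e => e.2.1 == v) = 0 := by
    rw [List.countP_eq_zero]
    intro e he hc
    rw [pvLive, List.mem_filter] at he
    obtain ⟨-, hb⟩ := he
    rw [Bool.and_eq_true, Bool.not_eq_true', Bool.not_eq_true'] at hb
    rw [beq_iff_eq] at hc
    rw [hc, h] at hb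
    exact absurd hb.2 (by decide)
  omega

-- if filtering strictly lowered v's degree, some kept-out edge touches v
theorem pvEdeg_filter_lt {L : List (Int × Int × Int)} {q : (Int × Int × Int) → Bool} {v : Int}
    (h : pvEdeg (L.filter q) v < pvEdeg L v) :
    ∃ e ∈ L, (e.1 = v ∨ e.2.1 = v) ∧ q e = false := by
  induction L with
  | nil => simp at h
  | cons e t ih =>
    cases hq : q e
    · by_cases hv : e.1 = v ∨ e.2.1 = v
      · exact ⟨e, List.mem_cons_self, hv, hq⟩
      · rw [not_or] at hv
        rw [List.filter_cons, hq] at h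
        rw [if_neg (by decide : ¬ (false = true)), pvEdeg_cons,
          if_neg (by simpa using hv.1), if_neg (by simpa using hv.2)] at h
        obtain ⟨e', he', hv', hq'⟩ := ih (by omega)
        exact ⟨e', List.mem_cons_of_mem _ he', hv', hq'⟩
    · rw [List.filter_cons, hq, if_pos rfl, pvEdeg_cons, pvEdeg_cons] at h
      obtain ⟨e', he', hv', hq'⟩ := ih (by split_ifs at h <;> omega)
      exact ⟨e', List.mem_cons_of_mem _ he', hv', hq'⟩

-- B's loop: from the two invariants, the final live list is good and keeps every good sublist
theorem pvBLoop_master :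
    ∀ (sub : List (Int × Int × Int)) (removed : PySem.Set Int) (queue : List Int),
      (∀ v, PySem.Set.contains removed v = false →
        pvEdeg (pvLive sub removed) v = 1 → v ∈ queue) →
      (∀ G, G.Sublist sub → pvGood G → G.Sublist (pvLive sub removed)) →
      pvGood (pvLive sub (pvBLoop sub removed queue)) ∧
        ∀ G, G.Sublist sub → pvGood G →
          G.Sublist (pvLive sub (pvBLoop sub removed queue)) := by
  intro sub removed queue
  induction removed, queue using pvBLoop.induct (sub := sub) with
  | case1 removed =>
    intro inv1 inv2
    rw [pvBLoop]
    refine ⟨?_, inv2⟩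
    intro v hv
    cases hc : PySem.Set.contains removed v
    · exact absurd (inv1 v hc hv) List.not_mem_nil
    · rw [pvEdeg_live_removed hc] at hv
      omega
  | case2 removed u rest hcond ih =>
    intro inv1 inv2
    rw [pvBLoop]
    simp only [hcond, if_pos]
    apply ih _ inv2
    intro v hv hd
    have hmem := inv1 v hv hd
    rcases List.mem_cons.mp hmem with rfl | hmem'
    · exfalso
      rcases Bool.or_eq_true _ _ |>.mp hcond with hc | hc
      · rw [hv] at hc
        exact Bool.false_ne_true hc
      · rw [Bool.not_eq_true', beq_eq_false_iff_ne] at hc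
        apply hc
        rw [pvLiveDeg_eq, hd]
        rfl
    · exact hmem'
  | case3 removed u rest hcond ih =>
    intro inv1 inv2
    rw [pvBLoop]
    simp only [hcond, Bool.false_eq_true, if_neg, not_false_iff]
    have hu : PySem.Set.contains removed u = false := by
      cases hc : PySem.Set.contains removed u
      · rfl
      · exact absurd (by rw [hc]; rfl) hcond
    have hdeg' : pvLiveDeg sub removed u = 1 := by
      by_contra hne
      exact hcond (by rw [hu, beq_eq_false_iff_ne.mpr hne]; rfl)
    have hdeg : pvEdeg (pvLive sub removed) u = 1 := by
      have := pvLiveDeg_eq sub removed u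
      rw [hdeg'] at this
      exact_mod_cast this.symm
    apply ih
    · -- inv1 is preserved
      intro v hv hd
      rw [pvContains_add, Bool.or_eq_false_iff, beq_eq_false_iff_ne] at hv
      obtain ⟨hv1, hvu⟩ := hv
      by_cases hcase : pvEdeg (pvLive sub removed) v = 1
      · have := inv1 v hv1 hcase
        rcases List.mem_cons.mp this with rfl | hmem'
        · exact absurd rfl hvu
        · exact List.mem_append_left _ hmem'
      · rw [pvLive_add] at hd
        have hle : pvEdeg ((pvLive sub removed).filter
              (fun e => !(e.1 == u) && !(e.2.1 == u))) v
            ≤ pvEdeg (pvLive sub removed) v :=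
          pvEdeg_sublist List.filter_sublist v
        have hlt : pvEdeg ((pvLive sub removed).filter
              (fun e => !(e.1 == u) && !(e.2.1 == u))) v
            < pvEdeg (pvLive sub removed) v := by omega
        obtain ⟨e, he, hev, heq⟩ := pvEdeg_filter_lt hlt
        have heu : e.1 = u ∨ e.2.1 = u := by
          cases h1 : e.1 == u <;> cases h2 : e.2.1 == u <;> rw [h1, h2] at heq
          · exact absurd heq (by simp)
          · exact Or.inr (by simpa using h2)
          · exact Or.inl (by simpa using h1)
          · exact Or.inl (by simpa using h1)
        apply List.mem_append_right
        rw [pvNbrs_eq]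
        refine List.mem_map.mpr ⟨e, List.mem_filter.mpr ⟨he, ?_⟩, ?_⟩
        · rcases heu with h' | h' <;> simp [h']
        · rcases heu with h' | h'
          · rw [if_pos (by simp [h'])]
            rcases hev with h'' | h''
            · exact absurd (h'.symm.trans h'') hvu.symm
            · exact h''
          · rcases hev with h'' | h''
            · rw [if_neg (by simp [h'']; exact hvu)]
              exact h''
            · exact absurd (h'.symm.trans h'') hvu.symm
    · -- inv2 is preserved
      intro G hG hg
      rw [pvLive_add]
      have hGL := inv2 G hG hg
      have hpred : ∀ e ∈ G, ((fun e => !(e.1 == u) && !(e.2.1 == u)) e) = true := by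
        intro e he
        have h1 : pvEdeg G u ≤ pvEdeg (pvLive sub removed) u := pvEdeg_sublist hGL u
        have h2 : pvEdeg G u ≠ 1 := hg u
        have h0 : pvEdeg G u = 0 := by omega
        have he1 : ¬ e.1 = u := by
          intro hh
          have := pvEdeg_pos he (Or.inl hh)
          omega
        have he2 : ¬ e.2.1 = u := by
          intro hh
          have := pvEdeg_pos he (Or.inr hh)
          omega
        simp [he1, he2]
      have := hGL.filter (fun e => !(e.1 == u) && !(e.2.1 == u))
      rwa [List.filter_eq_self.mpr hpred] at this

theorem pvLive_empty (sub : List (Int × Int × Int)) : pvLive sub PySem.Set.empty = sub := by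
  rw [pvLive, List.filter_eq_self]
  intro e _
  rfl

theorem mem_pvInitQueue {sub : List (Int × Int × Int)} {v : Int}
    (h : pvEdeg sub v = 1) : v ∈ pvInitQueue sub := by
  have hB : pvCountDegB sub = PySem.Dict.counter (pvEndpoints sub) := pvCountDeg_eq_counter sub
  rw [pvInitQueue, hB, mem_counterOnes, pvEndpoints_count]
  exact h

-- per-subnetwork equality of the two algorithms
theorem pvALoop_eq_pvBLoop (sub : List (Int × Int × Int)) :
    pvALoop sub = pvLive sub (pvBLoop sub PySem.Set.empty (pvInitQueue sub)) := by
  obtain ⟨hsub, hgood, hmax⟩ := pvALoop_master sub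
  have hinv1 : ∀ v, PySem.Set.contains PySem.Set.empty v = false →
      pvEdeg (pvLive sub PySem.Set.empty) v = 1 → v ∈ pvInitQueue sub := by
    intro v _ hd
    rw [pvLive_empty] at hd
    exact mem_pvInitQueue hd
  have hinv2 : ∀ G, G.Sublist sub → pvGood G → G.Sublist (pvLive sub PySem.Set.empty) := by
    intro G hG _
    rw [pvLive_empty]
    exact hG
  obtain ⟨hgB, hmaxB⟩ := pvBLoop_master sub PySem.Set.empty (pvInitQueue sub) hinv1 hinv2
  exact List.Sublist.antisymm (hmaxB _ hsub hgood) (hmax _ List.filter_sublist hgB)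

-- ===== VERDICT (by name: the statement is the Claim_ definition above) =====
theorem remove_hangers_spec : Claim_equal_remove_hangers := by
  intro subnetworks _
  unfold Spec_remove_hangers remove_hangers remove_hangers_alt
  apply List.map_eq_map_iff.mpr
  intro sub _
  exact pvALoop_eq_pvBLoop sub
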